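-- pv_equiv track=rewrite | github.com/rlecomte1929/rolec | backend/relocation_plan_status_derivation.py | merge_status_candidates
-- ===== SOURCE A (Python) =====
-- from typing import Any, Dict, FrozenSet, Iterable, List, Mapping, Optional, Sequence, Set, Tuple
--
-- VALID_PLAN_STATUSES: FrozenSet[str] = frozenset(
--     {"not_applicable", "blocked", "completed", "in_progress", "not_started"}
-- )
--
-- STATUS_PRECEDENCE: Tuple[str, ...] = (
--     "not_applicable",
--     "blocked",
--     "completed",
--     "in_progress",
--     "not_started",
-- )
--
-- _STATUS_INDEX: Dict[str, int] = {s: i for i, s in enumerate(STATUS_PRECEDENCE)}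
--
-- def status_precedence_rank(status: str) -> int:
--     return _STATUS_INDEX.get(status, len(STATUS_PRECEDENCE))
--
-- def merge_status_candidates(candidates: Iterable[str]) -> str:
--     """Pick the winning status from parallel signals using ``STATUS_PRECEDENCE``."""
--     best: Optional[str] = None
--     best_rank = len(STATUS_PRECEDENCE) + 1
--     for c in candidates:
--         if c not in VALID_PLAN_STATUSES:
--             continue
--         r = status_precedence_rank(c)
--         if r < best_rank:
--             best_rank = r
--             best = c
--     return best if best is not None else "not_started"
-- ===== SOURCE B (Python) =====
-- VALID_PLAN_STATUSES = frozenset(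
--     {"not_applicable", "blocked", "completed", "in_progress", "not_started"}
-- )
--
-- STATUS_PRECEDENCE = (
--     "not_applicable",
--     "blocked",
--     "completed",
--     "in_progress",
--     "not_started",
-- )
--
-- def merge_status_candidates(candidates):
--     """Pick the winning status: scan the precedence order against the set of seen statuses."""
--     present = {c for c in candidates if c in VALID_PLAN_STATUSES}
--     for s in STATUS_PRECEDENCE:
--         if s in present:
--             return s
--     return "not_started"
-- ===== Notes on version B (the rewrite author's own statement) =====
-- stated objective: alternative
-- what changed: B collects the valid candidates into a set in one pass and then walks the fixed precedence tuple returning the first status present, instead of A's candidate loop that tracks the best rank seen so far.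
import Mathlib
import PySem

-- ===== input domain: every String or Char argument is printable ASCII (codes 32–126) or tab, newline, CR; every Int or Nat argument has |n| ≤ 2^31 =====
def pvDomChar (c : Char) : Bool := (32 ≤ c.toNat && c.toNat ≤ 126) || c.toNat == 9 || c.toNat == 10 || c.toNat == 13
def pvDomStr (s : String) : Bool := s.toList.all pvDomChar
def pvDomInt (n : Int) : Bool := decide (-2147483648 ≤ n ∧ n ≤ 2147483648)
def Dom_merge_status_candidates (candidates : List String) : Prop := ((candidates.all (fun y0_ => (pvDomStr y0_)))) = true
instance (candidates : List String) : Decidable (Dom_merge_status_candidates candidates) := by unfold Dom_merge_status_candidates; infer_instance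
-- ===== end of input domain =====

-- B replaces A's candidate scan with best-rank tracking by a one-pass set of valid
-- candidates followed by a scan of the fixed precedence list (objective: alternative).

-- ===== PORT A =====
def pvVALID : PySem.Set String :=
  PySem.Set.ofList ["not_applicable", "blocked", "completed", "in_progress", "not_started"]

def pvPRECEDENCE : List String :=
  ["not_applicable", "blocked", "completed", "in_progress", "not_started"]

def pvSTATUS_INDEX : PySem.Dict String Int :=
  (PySem.List.enumerate pvPRECEDENCE).foldl (fun d p => d.insert p.2 p.1) PySem.Dict.empty

def status_precedence_rank (status : String) : Int :=
  pvSTATUS_INDEX.getD status 5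

-- the 'for c in candidates' loop of A, state = (best, best_rank)
def pvGoA : List String → Option String → Int → String
  | [], best, _ => best.getD "not_started"
  | c :: rest, best, best_rank =>
      if pvVALID.contains c then
        let r := status_precedence_rank c
        if r < best_rank then pvGoA rest (some c) r
        else pvGoA rest best best_rank
      else pvGoA rest best best_rank

def merge_status_candidates (candidates : List String) : String :=
  pvGoA candidates none 6

-- ===== PORT B =====
-- the 'for s in STATUS_PRECEDENCE' loop of B
def pvGoB : List String → PySem.Set String → String
  | [], _ => "not_started"
  | s :: rest, present => if present.contains s then s else pvGoB rest present

def merge_status_candidates_alt (candidates : List String) : String :=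
  let present : PySem.Set String :=
    PySem.Set.ofList (candidates.filter (fun c => pvVALID.contains c))
  pvGoB pvPRECEDENCE present

-- ===== PRECONDITION & SPEC =====
def Spec_merge_status_candidates (candidates : List String) (out : String) : Prop := out = merge_status_candidates_alt candidates
instance (candidates : List String) (out : String) : Decidable (Spec_merge_status_candidates candidates out) := by unfold Spec_merge_status_candidates; infer_instance

-- ===== CLAIM (what is proved, stated in full; the proofs are below) =====
def Claim_equal_merge_status_candidates : Prop := ∀ (candidates : List String), Dom_merge_status_candidates candidates → Spec_merge_status_candidates candidates (merge_status_candidates candidates)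

-- ===== LEMMAS AND PROOFS =====

-- abstract state of A's loop: the `best` value that goes with a best_rank r
def pvStA (r : Int) : Option String :=
  if r = 0 then some "not_applicable"
  else if r = 1 then some "blocked"
  else if r = 2 then some "completed"
  else if r = 3 then some "in_progress"
  else if r = 4 then some "not_started"
  else none

-- the intended value of A's loop from state r on the remaining list c
def pvBest (r : Int) (c : List String) : String :=
  if 0 < r ∧ c.contains "not_applicable" then "not_applicable"
  else if 1 < r ∧ c.contains "blocked" then "blocked"
  else if 2 < r ∧ c.contains "completed" then "completed"
  else if 3 < r ∧ c.contains "in_progress" then "in_progress"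
  else (pvStA r).getD "not_started"

-- concrete evaluations (keep simp away from the Dict/Set computations)
lemma pvRank0 : status_precedence_rank "not_applicable" = 0 := by decide
lemma pvRank1 : status_precedence_rank "blocked" = 1 := by decide
lemma pvRank2 : status_precedence_rank "completed" = 2 := by decide
lemma pvRank3 : status_precedence_rank "in_progress" = 3 := by decide
lemma pvRank4 : status_precedence_rank "not_started" = 4 := by decide
lemma pvC0 : pvVALID.contains "not_applicable" = true := by decide
lemma pvC1 : pvVALID.contains "blocked" = true := by decide
lemma pvC2 : pvVALID.contains "completed" = true := by decide
lemma pvC3 : pvVALID.contains "in_progress" = true := by decide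
lemma pvC4 : pvVALID.contains "not_started" = true := by decide

set_option maxHeartbeats 1000000 in
lemma pvGoA_eq (c : List String) :
    ∀ r : Int, r ∈ ([0, 1, 2, 3, 4, 6] : List Int) → pvGoA c (pvStA r) r = pvBest r c := by
  induction c with
  | nil =>
      intro r hr
      simp only [List.mem_cons, List.not_mem_nil, or_false] at hr
      rcases hr with rfl | rfl | rfl | rfl | rfl | rfl <;> simp [pvGoA, pvBest, pvStA]
  | cons x xs ih =>
      intro r hr
      simp only [List.mem_cons, List.not_mem_nil, or_false] at hr
      by_cases hv : pvVALID.contains x = true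
      · have hx : x ∈ (["not_applicable", "blocked", "completed", "in_progress",
            "not_started"] : List String) := by
          have := (PySem.Set.contains_iff (s := pvVALID) (x := x)).mp hv
          simpa [pvVALID, PySem.Set.mem_ofList] using this
        have i0 := ih 0 (by simp); have i1 := ih 1 (by simp); have i2 := ih 2 (by simp)
        have i3 := ih 3 (by simp); have i4 := ih 4 (by simp); have i6 := ih 6 (by simp)
        clear ih
        simp only [List.mem_cons, List.not_mem_nil, or_false] at hx
        rcases hr with rfl | rfl | rfl | rfl | rfl | rfl <;>
          rcases hx with rfl | rfl | rfl | rfl | rfl <;>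
          simp_all [pvGoA, pvStA, pvBest, pvRank0, pvRank1, pvRank2, pvRank3, pvRank4,
            pvVALID, PySem.Set.mem_ofList]
      · have hx : x ≠ "not_applicable" ∧ x ≠ "blocked" ∧ x ≠ "completed" ∧
            x ≠ "in_progress" ∧ x ≠ "not_started" := by
          refine ⟨?_, ?_, ?_, ?_, ?_⟩ <;> rintro rfl
          exacts [hv pvC0, hv pvC1, hv pvC2, hv pvC3, hv pvC4]
        obtain ⟨h1, h2, h3, h4, h5⟩ := hx
        have := ih r (by simpa using hr)
        rcases hr with rfl | rfl | rfl | rfl | rfl | rfl <;>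
          simp_all [pvGoA, pvBest, pvVALID, PySem.Set.mem_ofList,
            Ne.symm h1, Ne.symm h2, Ne.symm h3, Ne.symm h4]

lemma pvGoB_eq (c : List String) :
    merge_status_candidates_alt c = pvBest 6 c := by
  have hmem : ∀ s : String, pvVALID.contains s = true →
      (PySem.Set.ofList (c.filter (fun x => pvVALID.contains x))).contains s = c.contains s := by
    intro s hs
    have hiff : s ∈ PySem.Set.ofList (c.filter (fun x => pvVALID.contains x)) ↔ s ∈ c := by
      rw [PySem.Set.mem_ofList, List.mem_filter]
      exact ⟨fun h => h.1, fun h => ⟨h, hs⟩⟩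
    by_cases h : s ∈ c
    · have := (PySem.Set.contains_iff (s := PySem.Set.ofList (c.filter (fun x => pvVALID.contains x))) (x := s)).mpr (hiff.mpr h)
      simp_all
    · have hnot : ¬ s ∈ PySem.Set.ofList (c.filter (fun x => pvVALID.contains x)) :=
        fun hc => h (hiff.mp hc)
      have e1 : (PySem.Set.ofList (c.filter (fun x => pvVALID.contains x))).contains s = false := by
        cases he : (PySem.Set.ofList (c.filter (fun x => pvVALID.contains x))).contains s
        · rfl
        · exact absurd ((PySem.Set.contains_iff (s := PySem.Set.ofList (c.filter (fun x => pvVALID.contains x))) (x := s)).mp he) hnot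
      have e2 : c.contains s = false := by
        cases he : c.contains s
        · rfl
        · exact absurd (by simpa using he) h
      rw [e1, e2]
  simp only [merge_status_candidates_alt, pvPRECEDENCE, pvGoB, pvBest, pvStA]
  rw [hmem _ pvC0, hmem _ pvC1, hmem _ pvC2, hmem _ pvC3, hmem _ pvC4]
  by_cases h1 : c.contains "not_applicable" <;>
    by_cases h2 : c.contains "blocked" <;>
      by_cases h3 : c.contains "completed" <;>
        by_cases h4 : c.contains "in_progress" <;>
          by_cases h5 : c.contains "not_started" <;>
            simp_all

-- ===== VERDICT (by name: the statement is the Claim_ definition above) =====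
theorem merge_status_candidates_spec : Claim_equal_merge_status_candidates := by
  intro c _
  show merge_status_candidates c = merge_status_candidates_alt c
  rw [pvGoB_eq]
  have := pvGoA_eq c 6 (by simp)
  simpa [merge_status_candidates, pvStA] using this
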